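-- pv_equiv track=rewrite | github.com/pypi-data/pypi-mirror-246 | packages/ranshark/ranshark-1.0.0.7.tar.gz/ranshark-1.0.0.7/drawranflow/views_backup_before_Refactor.py | packet_to_dict
-- ===== SOURCE A (Python) =====
-- def packet_to_dict(packet):
--     # Extract IP layer if it exists
--     new_dict = {}
--
--     for key in packet:
--         # split the key by the first dot and get the top-level key and the second-level key suffix
--         if key != "" and "per" not in key:
--             if "." in key:
--                 top_level_key, suffix = key.split(".", 1)
--             else:
--                 top_level_key = key
--                 suffix = ""
--
--             # create a new dictionary with the top-level key if it doesn't exist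
--             if top_level_key not in new_dict:
--                 new_dict[top_level_key] = {}
--
--                 # add the second-level key suffix and its value to the new dictionary
--             new_dict[top_level_key][suffix] = packet[key]
--             # convert the output dictionary to a pretty-printed JSON string
--     return new_dict
-- ===== SOURCE B (Python) =====
-- def packet_to_dict(packet):
--     def split_key(key):
--         if "." in key:
--             top, suffix = key.split(".", 1)
--             return top, suffix
--         return key, ""
--
--     entries = [(split_key(key), value) for key, value in packet.items()
--                if key != "" and "per" not in key]
--     prefixes = list(dict.fromkeys(top for (top, _), _ in entries))
--     return {p: {s: v for (t, s), v in entries if t == p} for p in prefixes}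
-- ===== Notes on version B (the rewrite author's own statement) =====
-- stated objective: alternative
-- what changed: A builds the nested dict in one pass by mutating per-prefix sub-dicts as it scans; B first materialises a filtered list of ((prefix,suffix),value) entries, deduplicates the prefixes in first-appearance order, and then builds the whole result as a group-by comprehension (one inner dict comprehension per distinct prefix).
import Mathlib
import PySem

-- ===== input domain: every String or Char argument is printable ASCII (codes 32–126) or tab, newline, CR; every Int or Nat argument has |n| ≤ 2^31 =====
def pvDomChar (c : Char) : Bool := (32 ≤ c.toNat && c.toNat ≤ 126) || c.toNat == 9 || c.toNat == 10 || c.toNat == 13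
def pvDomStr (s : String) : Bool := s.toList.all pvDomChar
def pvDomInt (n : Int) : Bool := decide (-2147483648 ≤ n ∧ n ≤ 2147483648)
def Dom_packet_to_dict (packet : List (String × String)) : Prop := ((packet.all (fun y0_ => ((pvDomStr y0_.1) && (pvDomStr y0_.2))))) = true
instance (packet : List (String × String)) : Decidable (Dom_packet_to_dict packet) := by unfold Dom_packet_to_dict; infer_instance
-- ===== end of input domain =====

-- B rebuilds the nested dict as a group-by: one filtered entry list, deduplicated
-- prefixes, then one inner dict comprehension per prefix (objective: alternative).

-- ===== PORT A =====
-- B-side helper: split_key in Source B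
def pvSplitKey (key : String) : String × String :=
  if PySem.Str.isIn "." key then
    match PySem.Str.splitMax? key "." 1 with
    | some (top :: suffix :: _) => (top, suffix)
    | _ => (key, "")              -- unreachable, as above
  else (key, "")

-- (pvSplitKey is B's helper, placed first so the compiled matcher is shared under its name)
-- literal port of A: one pass, mutating the nested dict; packet[key] is the dict lookup
-- (the .getD "" default is unreachable: key is drawn from packet itself)
def packet_to_dict (packet : List (String × String)) : List (String × List (String × String)) :=
  let new_dict := packet.foldl
    (fun (nd : PySem.Dict String (PySem.Dict String String)) kv =>
      let key := kv.1
      if key != "" && !(PySem.Str.isIn "per" key) then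
        let ts :=
          if PySem.Str.isIn "." key then
            match PySem.Str.splitMax? key "." 1 with
            | some (top :: suffix :: _) => (top, suffix)
            | _ => (key, "")        -- unreachable: split(".",1) gives ≥ 2 parts when "." in key
          else (key, "")
        -- 'if top not in nd: nd[top] = {}' followed by 'nd[top][suffix] = packet[key]'
        let inner := (nd.get? ts.1).getD PySem.Dict.empty
        nd.insert ts.1 (inner.insert ts.2 (((PySem.Dict.mk packet).get? key).getD ""))
      else nd)
    PySem.Dict.empty
  new_dict.items.map (fun q => (q.1, q.2.items))

-- ===== PORT B =====
def packet_to_dict_alt (packet : List (String × String)) : List (String × List (String × String)) :=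
  let entries := packet.filterMap (fun kv =>
    if kv.1 != "" && !(PySem.Str.isIn "per" kv.1) then some (pvSplitKey kv.1, kv.2) else none)
  let prefixes := PySem.List.dedup (entries.map (fun e => e.1.1))
  -- the outer dict comprehension: its keys (prefixes) are distinct, so its items are this map;
  -- each inner dict comprehension is the fold of inserts over the group's entries
  prefixes.map (fun p => (p,
    ((entries.filter (fun e => e.1.1 == p)).foldl
      (fun (d : PySem.Dict String String) e => d.insert e.1.2 e.2) PySem.Dict.empty).items))

-- ===== PRECONDITION & SPEC =====
-- The Python argument is a dict, which cannot hold duplicate keys; Pre_ states exactly that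
-- invariant of the association-list encoding (duplicate-key lists encode no Python input).
def Pre_packet_to_dict (packet : List (String × String)) : Prop :=
  (packet.map Prod.fst).Nodup

instance (packet : List (String × String)) : Decidable (Pre_packet_to_dict packet) := by
  unfold Pre_packet_to_dict; infer_instance

def pvWitness_packet_to_dict : (List (String × String)) :=
  [("ip.src", "10.0.0.1"), ("ip.dst", "10.0.0.2"), ("tcp", "x"), ("", "y"), ("frame.per.x", "z")]

def Spec_packet_to_dict (packet : List (String × String)) (out : List (String × List (String × String))) : Prop := out = packet_to_dict_alt packet
instance (packet : List (String × String)) (out : List (String × List (String × String))) : Decidable (Spec_packet_to_dict packet out) := by unfold Spec_packet_to_dict; infer_instance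

-- ===== CLAIM (what is proved, stated in full; the proofs are below) =====
def Claim_equal_packet_to_dict : Prop := ∀ (packet : List (String × String)), Dom_packet_to_dict packet → Pre_packet_to_dict packet → Spec_packet_to_dict packet (packet_to_dict packet)

-- ===== LEMMAS AND PROOFS =====

-- the filtered-entry step of A's fold, with the value already resolved
def pvStepA (nd : PySem.Dict String (PySem.Dict String String)) (e : (String × String) × String) :
    PySem.Dict String (PySem.Dict String String) :=
  nd.insert e.1.1 (((nd.get? e.1.1).getD PySem.Dict.empty).insert e.1.2 e.2)

-- B's inner dict for prefix p
def pvG (p : String) (E : List ((String × String) × String)) : PySem.Dict String String :=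
  (E.filter (fun e => e.1.1 == p)).foldl (fun d e => d.insert e.1.2 e.2) PySem.Dict.empty

lemma pv_dedup_append_single {α : Type} [BEq α] [LawfulBEq α] (l : List α) (x : α) :
    PySem.List.dedup (l ++ [x]) =
      if x ∈ PySem.List.dedup l then PySem.List.dedup l else PySem.List.dedup l ++ [x] := by
  have h1 : PySem.List.dedup (l ++ [x]) = PySem.Set.add (PySem.List.dedup l) x := by
    simp [PySem.List.dedup_eq_ofList, PySem.Set.ofList_eq_foldl, List.foldl_append]
  rw [h1, PySem.Set.add]
  simp

lemma pv_filter_eq_nil_of_not_mem (E : List ((String × String) × String)) (p : String)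
    (h : p ∉ E.map (fun e => e.1.1)) : E.filter (fun e => e.1.1 == p) = [] := by
  rw [List.filter_eq_nil_iff]
  intro e he
  simp only [beq_iff_eq]
  intro hx
  exact h (List.mem_map.mpr ⟨e, he, hx⟩)

lemma pvG_append (p : String) (E : List ((String × String) × String)) (e : (String × String) × String) :
    pvG p (E ++ [e]) = if e.1.1 == p then (pvG p E).insert e.1.2 e.2 else pvG p E := by
  by_cases hp : e.1.1 = p <;> simp [pvG, List.filter_append, hp]

lemma pv_main (E : List ((String × String) × String)) :
    (E.foldl pvStepA PySem.Dict.empty).items =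
      (PySem.List.dedup (E.map (fun e => e.1.1))).map (fun p => (p, pvG p E)) := by
  induction E using List.reverseRecOn with
  | nil => simp [PySem.List.dedup_eq_ofList, PySem.Set.ofList_eq_foldl, PySem.Dict.empty]
  | append_singleton E e ih =>
    set d := E.foldl pvStepA PySem.Dict.empty with hd
    have hkeys : d.keys = PySem.List.dedup (E.map (fun e => e.1.1)) := by
      simp [PySem.Dict.keys, ih, List.map_map, Function.comp_def]
    have hnodk : d.keys.Nodup := by rw [hkeys]; exact PySem.List.nodup_dedup _
    rw [List.foldl_append, List.foldl_cons, List.foldl_nil, List.map_append, List.map_cons,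
      List.map_nil, pv_dedup_append_single, ← hd]
    by_cases hmem : e.1.1 ∈ PySem.List.dedup (E.map (fun e => e.1.1))
    · have hcont : d.contains e.1.1 = true :=
        (PySem.Dict.contains_iff_mem_keys d _).mpr (by rw [hkeys]; exact hmem)
      have hget : d.get? e.1.1 = some (pvG e.1.1 E) := by
        refine PySem.Dict.get?_of_mem_items d ?_ hnodk
        rw [ih]; exact List.mem_map_of_mem hmem
      simp only [pvStepA, hget, Option.getD_some]
      rw [PySem.Dict.items_insert_of_contains d _ hcont, ih, if_pos hmem, List.map_map]
      apply List.map_congr_left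
      intro p hp
      by_cases hpt : p = e.1.1
      · subst hpt; simp [pvG_append]
      · simp [pvG_append, hpt, Ne.symm hpt]
    · have hcont : d.contains e.1.1 = false := by
        cases hc : d.contains e.1.1
        · rfl
        · exact absurd (by rw [← hkeys]; exact (PySem.Dict.contains_iff_mem_keys d _).mp hc) hmem
      have hget : d.get? e.1.1 = none :=
        (PySem.Dict.get?_eq_none_iff_not_mem_keys d _).mpr (by rw [hkeys]; exact hmem)
      have hfil : E.filter (fun x => x.1.1 == e.1.1) = [] :=
        pv_filter_eq_nil_of_not_mem E _
          (fun hx => hmem ((PySem.List.mem_dedup _ _).mpr hx))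
      simp only [pvStepA, hget, Option.getD_none]
      rw [PySem.Dict.items_insert_of_not_contains d _ hcont, ih, if_neg hmem, List.map_append]
      congr 1
      · apply List.map_congr_left
        intro p hp
        have hpt : e.1.1 ≠ p := fun h => hmem (h ▸ hp)
        simp [pvG_append, hpt]
      · simp [pvG, List.filter_append, hfil]

lemma pv_foldl_filterMap {α β γ : Type} (c : α → Bool) (h : α → γ) (g : β → γ → β) :
    ∀ (l : List α) (init : β),
      l.foldl (fun acc x => if c x then g acc (h x) else acc) init =
        (l.filterMap (fun x => if c x then some (h x) else none)).foldl g init := by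
  intro l
  induction l with
  | nil => intro init; simp
  | cons a t ih =>
    intro init
    by_cases hc : c a = true <;> simp [hc, ih]

lemma pv_lookup_of_mem (packet : List (String × String)) (hnd : (packet.map Prod.fst).Nodup)
    (kv : String × String) (hm : kv ∈ packet) :
    (PySem.Dict.mk packet).get? kv.1 = some kv.2 := by
  apply PySem.Dict.get?_of_mem_items
  · simpa using hm
  · simpa [PySem.Dict.keys] using hnd

-- ===== VERDICT (by name: the statement is the Claim_ definition above) =====
theorem packet_to_dict_spec : Claim_equal_packet_to_dict := by
  intro packet _hdom hpre
  unfold Spec_packet_to_dict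
  show packet_to_dict packet = packet_to_dict_alt packet
  unfold packet_to_dict packet_to_dict_alt
  have h1 : packet.foldl
      (fun (nd : PySem.Dict String (PySem.Dict String String)) kv =>
        let key := kv.1
        if key != "" && !(PySem.Str.isIn "per" key) then
          let ts :=
            if PySem.Str.isIn "." key then
              match PySem.Str.splitMax? key "." 1 with
              | some (top :: suffix :: _) => (top, suffix)
              | _ => (key, "")
            else (key, "")
          let inner := (nd.get? ts.1).getD PySem.Dict.empty
          nd.insert ts.1 (inner.insert ts.2 (((PySem.Dict.mk packet).get? key).getD ""))
        else nd)
      PySem.Dict.empty =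
    packet.foldl
      (fun nd kv =>
        if kv.1 != "" && !(PySem.Str.isIn "per" kv.1) then pvStepA nd (pvSplitKey kv.1, kv.2)
        else nd)
      PySem.Dict.empty := by
    apply PySem.List.foldl_congr_mem
    intro acc kv hkv
    have hv : ((PySem.Dict.mk packet).get? kv.1).getD "" = kv.2 := by
      rw [pv_lookup_of_mem packet hpre kv hkv]; rfl
    by_cases hc : (kv.1 != "" && !(PySem.Str.isIn "per" kv.1)) = true
    · simp only [hc, if_true, hv]
      rfl
    · simp only [Bool.not_eq_true] at hc
      simp only [hc, Bool.false_eq_true, if_false]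
  rw [h1, pv_foldl_filterMap]
  simp only [pv_main, List.map_map]
  apply List.map_congr_left
  intro p hp
  rfl
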